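-- pv_equiv track=rewrite | github.com/YelenaTor/FoM-Datamined-Insanity | tools/discover_areas.py | discover_locations
-- ===== SOURCE A (Python) =====
-- def discover_locations(data):
--     locations = {}
--     for k, v in data.items():
--         if not k.startswith("locations/"):
--             continue
--         parts = k.split("/")
--         if len(parts) < 2:
--             continue
--         loc_id = parts[1]
--         if loc_id not in locations:
--             locations[loc_id] = {}
--         if len(parts) >= 3:
--             locations[loc_id]["/".join(parts[2:])] = v
--     return locations
-- ===== SOURCE B (Python) =====
-- def discover_locations(data):
--     entries = [(k.split("/"), v) for k, v in data.items() if k.startswith("locations/")]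
--     ids = []
--     for parts, _ in entries:
--         if len(parts) >= 2 and parts[1] not in ids:
--             ids.append(parts[1])
--     return {
--         i: {"/".join(parts[2:]): v
--             for parts, v in entries
--             if len(parts) >= 3 and parts[1] == i}
--         for i in ids
--     }
-- ===== Notes on version B (the rewrite author's own statement) =====
-- stated objective: alternative
-- what changed: Replaces A's single streaming pass that mutates a nested dict-of-dicts with a two-phase plan: first collect the split entries and the ordered list of distinct location ids, then build the result as a comprehension that, for each id, gathers that id's sub-entries by filtering the pre-split entry list.
import Mathlib
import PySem

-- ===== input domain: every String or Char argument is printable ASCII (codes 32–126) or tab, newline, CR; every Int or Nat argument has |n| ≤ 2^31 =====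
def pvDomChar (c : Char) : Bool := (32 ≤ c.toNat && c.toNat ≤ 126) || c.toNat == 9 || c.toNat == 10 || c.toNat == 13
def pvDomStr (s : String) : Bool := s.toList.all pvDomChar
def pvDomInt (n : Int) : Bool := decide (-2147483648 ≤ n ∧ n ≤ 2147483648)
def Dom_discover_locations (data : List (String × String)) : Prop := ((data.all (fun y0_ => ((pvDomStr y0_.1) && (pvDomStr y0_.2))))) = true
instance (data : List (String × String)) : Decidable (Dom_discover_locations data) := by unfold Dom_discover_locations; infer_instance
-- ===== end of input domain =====

-- B rebuilds the result in two phases (pre-split entry list + ordered id list, then a per-id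
-- filtering comprehension) instead of A's single streaming pass over a nested dict; alternative
-- decomposition, not claimed faster.

-- ===== PORT A =====
-- A-side helper: the body of A's for-loop (one step of the streaming pass).
def pvStepA (locations : PySem.Dict String (PySem.Dict String String)) (kv : String × String) :
    PySem.Dict String (PySem.Dict String String) :=
  if !(PySem.Str.startswith kv.1 "locations/") then locations
  else
    let parts := (PySem.Str.split? kv.1 "/").getD []   -- k.split("/"); sep "/" ≠ "" so split? is always some
    if parts.length < 2 then locations
    else
      let loc_id := PySem.List.pyGetD parts 1 ""       -- parts[1]; in range by the guard above
      let locations :=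
        if locations.contains loc_id then locations
        else locations.insert loc_id PySem.Dict.empty
      if 3 ≤ parts.length then
        -- locations[loc_id]["/".join(parts[2:])] = v  (loc_id is present here, so modify is exact)
        locations.modify loc_id PySem.Dict.empty
          (fun inner => inner.insert (PySem.Str.join "/" (parts.drop 2)) kv.2)
      else locations

def discover_locations (data : List (String × String)) : List (String × List (String × String)) :=
  let locations := data.foldl pvStepA PySem.Dict.empty
  locations.items.map (fun p => (p.1, p.2.items))

-- ===== PORT B =====
def discover_locations_alt (data : List (String × String)) : List (String × List (String × String)) :=
  let entries : List (List String × String) :=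
    (data.filter (fun kv => PySem.Str.startswith kv.1 "locations/")).map
      (fun kv => ((PySem.Str.split? kv.1 "/").getD [], kv.2))
  let ids : PySem.Set String :=
    entries.foldl (fun ids pv =>
      if 2 ≤ pv.1.length && !(PySem.Set.contains ids (PySem.List.pyGetD pv.1 1 "")) then
        ids ++ [PySem.List.pyGetD pv.1 1 ""]
      else ids) []
  ids.map (fun i =>
    (i, (PySem.Dict.ofList
          ((entries.filter (fun pv => decide (3 ≤ pv.1.length) && (PySem.List.pyGetD pv.1 1 "" == i))).map
            (fun pv => (PySem.Str.join "/" (pv.1.drop 2), pv.2)))).items))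

-- ===== PRECONDITION & SPEC =====
def Spec_discover_locations (data : List (String × String)) (out : List (String × List (String × String))) : Prop := out = discover_locations_alt data
instance (data : List (String × String)) (out : List (String × List (String × String))) : Decidable (Spec_discover_locations data out) := by unfold Spec_discover_locations; infer_instance

-- ===== CLAIM (what is proved, stated in full; the proofs are below) =====
def Claim_equal_discover_locations : Prop := ∀ (data : List (String × String)), Dom_discover_locations data → Spec_discover_locations data (discover_locations data)

-- ===== LEMMAS AND PROOFS =====

-- Abbreviations for the pieces of one input pair (proof-side only).
def pvQ (kv : String × String) : Bool := PySem.Str.startswith kv.1 "locations/"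
def pvParts (kv : String × String) : List String := (PySem.Str.split? kv.1 "/").getD []
def pvKid (kv : String × String) : String := PySem.List.pyGetD (pvParts kv) 1 ""
def pvPay (kv : String × String) : String × String :=
  (PySem.Str.join "/" ((pvParts kv).drop 2), kv.2)
-- Shared filter conditions: qualifying key with ≥ 2 segments / ≥ 3 segments and id i.
def pvC3 (i : String) (kv : String × String) : Bool :=
  pvQ kv && (decide (3 ≤ (pvParts kv).length) && (pvKid kv == i))
def pvC2 (kv : String × String) : Bool := pvQ kv && decide (2 ≤ (pvParts kv).length)
-- B-side shapes (definitionally the lambdas of discover_locations_alt).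
def pvG (kv : String × String) : List String × String := (pvParts kv, kv.2)
def pvBodyB (s : PySem.Set String) (pv : List String × String) : PySem.Set String :=
  if 2 ≤ pv.1.length && !(PySem.Set.contains s (PySem.List.pyGetD pv.1 1 "")) then
    s ++ [PySem.List.pyGetD pv.1 1 ""]
  else s

lemma pvStepA_keys (d : PySem.Dict String (PySem.Dict String String)) (kv : String × String) :
    (pvStepA d kv).keys = if pvC2 kv then PySem.Set.add d.keys (pvKid kv) else d.keys := by
  unfold pvStepA pvC2 pvQ pvKid pvParts
  cases hq : PySem.Str.startswith kv.1 "locations/" with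
  | false => simp
  | true =>
    simp only [hq]
    by_cases h2 : ((PySem.Str.split? kv.1 "/").getD []).length < 2
    · have h2' : ¬ 2 ≤ ((PySem.Str.split? kv.1 "/").getD []).length := by omega
      simp [h2, h2']
    · have h2' : 2 ≤ ((PySem.Str.split? kv.1 "/").getD []).length := by omega
      set ps := (PySem.Str.split? kv.1 "/").getD [] with hps
      set kid := PySem.List.pyGetD ps 1 "" with hkid
      by_cases hc : d.contains kid
      · have hmem : kid ∈ d.keys := (PySem.Dict.contains_iff_mem_keys d kid).mp hc
        by_cases h3 : 3 ≤ ps.length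
        · simp [h2, h2', hc, h3, PySem.Dict.keys_modify,
            PySem.Dict.keys_insert_of_contains d _ hc, PySem.Set.add, hmem]
        · simp [h2, h2', hc, h3, PySem.Set.add, hmem]
      · rw [Bool.not_eq_true] at hc
        have hmem : kid ∉ d.keys := by
          intro h
          rw [(PySem.Dict.contains_iff_mem_keys d kid).mpr h] at hc; cases hc
        have hc' : (d.insert kid PySem.Dict.empty).contains kid = true :=
          PySem.Dict.contains_insert_self _ _ _
        by_cases h3 : 3 ≤ ps.length
        · simp [h2, h2', hc, h3, PySem.Dict.keys_modify,
            PySem.Dict.keys_insert_of_contains _ _ hc',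
            PySem.Dict.keys_insert_of_not_contains d _ hc, PySem.Set.add, hmem]
        · simp [h2, h2', hc, h3,
            PySem.Dict.keys_insert_of_not_contains d _ hc, PySem.Set.add, hmem]

lemma pvStepA_getD (d : PySem.Dict String (PySem.Dict String String)) (kv : String × String) (i : String) :
    (pvStepA d kv).getD i PySem.Dict.empty =
      if pvC3 i kv
      then (d.getD i PySem.Dict.empty).insert (pvPay kv).1 (pvPay kv).2
      else d.getD i PySem.Dict.empty := by
  unfold pvStepA pvC3 pvPay pvQ pvKid pvParts
  cases hq : PySem.Str.startswith kv.1 "locations/" with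
  | false => simp
  | true =>
    simp only [hq]
    by_cases h2 : ((PySem.Str.split? kv.1 "/").getD []).length < 2
    · have h3' : ¬ 3 ≤ ((PySem.Str.split? kv.1 "/").getD []).length := by omega
      simp [h2, h3']
    · set ps := (PySem.Str.split? kv.1 "/").getD [] with hps
      set kid := PySem.List.pyGetD ps 1 "" with hkid
      by_cases h3 : 3 ≤ ps.length
      · by_cases hc : d.contains kid
        · by_cases hi : i = kid
          · subst hi
            simp [h2, h3, hc]
          · have hi' : ¬ kid = i := fun h => hi h.symm
            simp [h2, h3, hc, PySem.Dict.getD_modify, hi, hi']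
        · rw [Bool.not_eq_true] at hc
          by_cases hi : i = kid
          · subst hi
            simp [h2, h3, hc,
              PySem.Dict.getD_of_not_contains d _ hc]
          · have hi' : ¬ kid = i := fun h => hi h.symm
            simp [h2, h3, hc, PySem.Dict.getD_modify, PySem.Dict.getD_insert, hi, hi']
      · by_cases hc : d.contains kid
        · simp [h2, h3, hc]
        · rw [Bool.not_eq_true] at hc
          by_cases hi : i = kid
          · subst hi
            simp [h2, h3, hc,
              PySem.Dict.getD_of_not_contains d _ hc]
          · have hi' : ¬ kid = i := fun h => hi h.symm
            simp [h2, h3, hc, PySem.Dict.getD_insert, hi]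

lemma pvFold_keys (l : List (String × String)) (d : PySem.Dict String (PySem.Dict String String)) :
    (l.foldl pvStepA d).keys = ((l.filter pvC2).map pvKid).foldl PySem.Set.add d.keys := by
  induction l generalizing d with
  | nil => simp
  | cons kv t ih =>
    simp only [List.foldl_cons, List.filter_cons]
    rw [ih, pvStepA_keys]
    by_cases h : pvC2 kv = true
    · simp [h]
    · simp [h]

lemma pvFold_getD (l : List (String × String)) (d : PySem.Dict String (PySem.Dict String String)) (i : String) :
    (l.foldl pvStepA d).getD i PySem.Dict.empty =
      ((l.filter (pvC3 i)).map pvPay).foldl (fun e p => e.insert p.1 p.2) (d.getD i PySem.Dict.empty) := by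
  induction l generalizing d with
  | nil => simp
  | cons kv t ih =>
    simp only [List.foldl_cons, List.filter_cons]
    rw [ih, pvStepA_getD]
    by_cases h : pvC3 i kv = true
    · simp [h]
    · simp [h]

lemma pvA_char (data : List (String × String)) :
    discover_locations data =
      (PySem.Set.ofList ((data.filter pvC2).map pvKid)).map
        (fun i => (i, (((data.filter (pvC3 i)).map pvPay).foldl
            (fun e p => e.insert p.1 p.2) (PySem.Dict.empty : PySem.Dict String String)).items)) := by
  show (List.foldl pvStepA PySem.Dict.empty data).items.map (fun p => (p.1, p.2.items)) = _
  have hkeys : (data.foldl pvStepA PySem.Dict.empty).keys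
      = PySem.Set.ofList ((data.filter pvC2).map pvKid) := by
    rw [pvFold_keys, PySem.Set.ofList_eq_foldl, PySem.Dict.keys_empty]
  have hnd : (data.foldl pvStepA PySem.Dict.empty).keys.Nodup := by
    rw [hkeys]; exact PySem.Set.nodup_ofList _
  rw [PySem.Dict.items_eq_map_keys _ hnd PySem.Dict.empty, hkeys, List.map_map]
  apply List.map_congr_left
  intro i _
  simp only [Function.comp]
  rw [pvFold_getD]
  simp

lemma pvIds (l : List (String × String)) (s : PySem.Set String) :
    ((l.filter pvQ).map pvG).foldl pvBodyB s
      = ((l.filter pvC2).map pvKid).foldl PySem.Set.add s := by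
  induction l generalizing s with
  | nil => rfl
  | cons kv t ih =>
    simp only [List.filter_cons]
    cases hq : pvQ kv with
    | false =>
      have hc2 : pvC2 kv = false := by simp [pvC2, hq]
      simp [hc2, ih]
    | true =>
      by_cases h2 : 2 ≤ (pvParts kv).length
      · have hc2 : pvC2 kv = true := by simp [pvC2, hq, h2]
        cases hmem : PySem.Set.contains s (pvKid kv) with
        | true =>
          have hmem' : pvKid kv ∈ s := by simpa [PySem.Set.contains] using hmem
          have hb : pvBodyB s (pvG kv) = s := by
            simp only [pvBodyB, show (pvG kv).1 = pvParts kv from rfl,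
              show PySem.List.pyGetD (pvParts kv) 1 "" = pvKid kv from rfl]
            simp [h2, hmem']
          have ha : PySem.Set.add s (pvKid kv) = s := by simp [PySem.Set.add, hmem']
          simp only [if_true, hc2, List.map_cons, List.foldl_cons, hb, ha, ih]
        | false =>
          have hmem' : pvKid kv ∉ s := by simpa [PySem.Set.contains] using hmem
          have hb : pvBodyB s (pvG kv) = s ++ [pvKid kv] := by
            simp only [pvBodyB, show (pvG kv).1 = pvParts kv from rfl,
              show PySem.List.pyGetD (pvParts kv) 1 "" = pvKid kv from rfl]
            simp [h2, hmem']
          have ha : PySem.Set.add s (pvKid kv) = s ++ [pvKid kv] := by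
            simp [PySem.Set.add, hmem']
          simp only [if_true, hc2, List.map_cons, List.foldl_cons, hb, ha, ih]
      · have hc2 : pvC2 kv = false := by simp [pvC2, h2]
        have hb : pvBodyB s (pvG kv) = s := by
          simp only [pvBodyB, show (pvG kv).1 = pvParts kv from rfl]
          simp [h2]
        simp only [if_true, hc2, List.map_cons, List.foldl_cons, hb,
          Bool.false_eq_true, if_false, ih]

lemma pvInner (l : List (String × String)) (i : String) :
    (((l.filter pvQ).map pvG).filter
       (fun pv => decide (3 ≤ pv.1.length) && (PySem.List.pyGetD pv.1 1 "" == i))).map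
       (fun pv => (PySem.Str.join "/" (pv.1.drop 2), pv.2))
     = (l.filter (pvC3 i)).map pvPay := by
  induction l with
  | nil => rfl
  | cons kv t ih =>
    simp only [List.filter_cons]
    cases hq : pvQ kv with
    | false =>
      have hc3 : pvC3 i kv = false := by simp [pvC3, hq]
      simp [hc3, ih]
    | true =>
      have hpg : (fun (pv : List String × String) =>
          decide (3 ≤ pv.1.length) && (PySem.List.pyGetD pv.1 1 "" == i)) (pvG kv)
          = (decide (3 ≤ (pvParts kv).length) && (pvKid kv == i)) := rfl
      cases hc : (decide (3 ≤ (pvParts kv).length) && (pvKid kv == i)) with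
      | true =>
        have hc3 : pvC3 i kv = true := by simp only [pvC3, hq, Bool.true_and]; exact hc
        have hpay : (fun (pv : List String × String) =>
            (PySem.Str.join "/" (pv.1.drop 2), pv.2)) (pvG kv) = pvPay kv := rfl
        simp only [if_true, List.map_cons, List.filter_cons, hpg, hc, hc3,
          List.map_cons, hpay, ih]
      | false =>
        have hc3 : pvC3 i kv = false := by simp only [pvC3, hq, Bool.true_and]; exact hc
        simp only [if_true, List.map_cons, List.filter_cons, hpg, hc, hc3,
          Bool.false_eq_true, if_false, ih]

lemma pvB_char (data : List (String × String)) :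
    discover_locations_alt data =
      (PySem.Set.ofList ((data.filter pvC2).map pvKid)).map
        (fun i => (i, (((data.filter (pvC3 i)).map pvPay).foldl
            (fun e p => e.insert p.1 p.2) (PySem.Dict.empty : PySem.Dict String String)).items)) := by
  show (((data.filter pvQ).map pvG).foldl pvBodyB []).map (fun i =>
    (i, (PySem.Dict.ofList
          ((((data.filter pvQ).map pvG).filter
             (fun pv => decide (3 ≤ pv.1.length) && (PySem.List.pyGetD pv.1 1 "" == i))).map
            (fun pv => (PySem.Str.join "/" (pv.1.drop 2), pv.2)))).items)) = _
  rw [pvIds]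
  have hof : ((data.filter pvC2).map pvKid).foldl PySem.Set.add ([] : PySem.Set String)
      = PySem.Set.ofList ((data.filter pvC2).map pvKid) :=
    (PySem.Set.ofList_eq_foldl _).symm
  rw [hof]
  apply List.map_congr_left
  intro i _
  congr 1
  rw [pvInner]
  rfl

-- ===== VERDICT (by name: the statement is the Claim_ definition above) =====
theorem discover_locations_spec : Claim_equal_discover_locations := by
  intro data _
  unfold Spec_discover_locations
  rw [pvA_char, pvB_char]
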